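-- pv_equiv track=rewrite | github.com/beatovk/planner | deprecated/core/normalize/attrs.py | enrich_tags
-- ===== SOURCE A (Python) =====
-- from typing import List, Optional, Dict, Iterable
--
-- EDITOR_LABELS = {
--     "editor's pick": "editors_pick",
--     "editor pick": "editors_pick",
--     "featured": "featured",
--     "recommended": "recommended",
--     "top pick": "top_pick",
--     "must see": "must_see",
--     "highlight": "highlight",
-- }
--
-- def _lower_strip_all(items: Iterable[str]) -> List[str]:
--     """Нормализует все строки к нижнему регистру и убирает пробелы."""
--     return [i.strip().lower() for i in items if isinstance(i, str) and i.strip()]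
--
-- def enrich_tags(tags: Optional[List[str]], editor_labels: Optional[List[str]] = None) -> List[str]:
--     """
--     Дополняет список тегов, сохраняя порядок.
--     - нормализуем к нижнему регистру
--     - уникализируем в порядке первого появления
--     - добавляем mapped editor labels в конец, если их ещё нет
--     """
--     base = _lower_strip_all(tags or [])
--     seen = set()
--     result: List[str] = []
--
--     # Добавляем базовые теги в порядке первого появления
--     for t in base:
--         if t not in seen:
--             seen.add(t)
--             result.append(t)
--
--     # Добавляем editor labels в конец, если их ещё нет
--     for label in _lower_strip_all(editor_labels or []):
--         mapped = EDITOR_LABELS.get(label)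
--         if mapped and mapped not in seen:
--             seen.add(mapped)
--             result.append(mapped)
--
--     return result
-- ===== SOURCE B (Python) =====
-- from typing import List, Optional
--
-- EDITOR_LABELS = {
--     "editor's pick": "editors_pick",
--     "editor pick": "editors_pick",
--     "featured": "featured",
--     "recommended": "recommended",
--     "top pick": "top_pick",
--     "must see": "must_see",
--     "highlight": "highlight",
-- }
--
-- def enrich_tags(tags: Optional[List[str]], editor_labels: Optional[List[str]] = None) -> List[str]:
--     norm = lambda items: [i.strip().lower() for i in items or [] if isinstance(i, str) and i.strip()]
--     candidates = norm(tags) + [EDITOR_LABELS[l] for l in norm(editor_labels) if l in EDITOR_LABELS]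
--     # first-occurrence index of every candidate, built once
--     first = {}
--     for i, x in enumerate(candidates):
--         if x not in first:
--             first[x] = i
--     # keep exactly the positions that ARE their value's first occurrence
--     return [x for i, x in enumerate(candidates) if first[x] == i]
-- ===== Notes on version B (the rewrite author's own statement) =====
-- stated objective: alternative
-- what changed: B concatenates the normalized tags with the dict-mapped editor labels into one candidate list, builds a first-occurrence-index map over it in one pass, and then keeps exactly the positions equal to their value's first-occurrence index, instead of A's two append loops growing a result under a shared seen set.
import Mathlib
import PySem

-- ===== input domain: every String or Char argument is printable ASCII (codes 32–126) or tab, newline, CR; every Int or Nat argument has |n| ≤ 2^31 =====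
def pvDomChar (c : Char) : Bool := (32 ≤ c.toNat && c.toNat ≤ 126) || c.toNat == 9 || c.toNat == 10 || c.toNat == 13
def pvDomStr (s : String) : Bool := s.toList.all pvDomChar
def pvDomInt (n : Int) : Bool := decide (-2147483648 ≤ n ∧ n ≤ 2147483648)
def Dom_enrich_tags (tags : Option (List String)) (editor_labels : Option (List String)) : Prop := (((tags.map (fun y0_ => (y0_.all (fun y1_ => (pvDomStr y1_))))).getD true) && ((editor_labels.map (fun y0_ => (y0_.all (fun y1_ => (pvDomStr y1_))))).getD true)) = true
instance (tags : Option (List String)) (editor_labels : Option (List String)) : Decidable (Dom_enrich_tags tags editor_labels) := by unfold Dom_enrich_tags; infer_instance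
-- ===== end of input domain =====

-- B builds one combined candidate list, then a first-occurrence-index map over it,
-- and keeps exactly the positions equal to their value's first-occurrence index,
-- instead of A's two append loops over a shared seen set (objective: alternative).

-- ===== PORT A =====
def pvEditorLabels : PySem.Dict String String := PySem.Dict.mk
  [("editor's pick", "editors_pick"), ("editor pick", "editors_pick"),
   ("featured", "featured"), ("recommended", "recommended"),
   ("top pick", "top_pick"), ("must see", "must_see"), ("highlight", "highlight")]

-- [i.strip().lower() for i in items if isinstance(i, str) and i.strip()]
def pvLowerStripAll (items : List String) : List String :=
  (items.filter (fun i => !(PySem.Str.strip i == ""))).map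
    (fun i => PySem.Str.lower (PySem.Str.strip i))

def enrich_tags (tags : Option (List String)) (editor_labels : Option (List String)) : List String :=
  let base := pvLowerStripAll (tags.getD [])
  -- first loop: base tags, first occurrence order
  let st1 : PySem.Set String × List String :=
    base.foldl (fun st t => if t ∈ st.1 then st else (PySem.Set.add st.1 t, st.2 ++ [t]))
      (PySem.Set.empty, [])
  -- second loop: mapped editor labels not yet seen
  let st2 : PySem.Set String × List String :=
    (pvLowerStripAll (editor_labels.getD [])).foldl (fun st label =>
      match pvEditorLabels.get? label with
      | none => st
      | some mapped =>
          if mapped ≠ "" ∧ mapped ∉ st.1 then (PySem.Set.add st.1 mapped, st.2 ++ [mapped]) else st)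
      st1
  st2.2

-- ===== PORT B =====
def pvNorm (items : Option (List String)) : List String :=
  ((items.getD []).filter (fun i => !(PySem.Str.strip i == ""))).map
    (fun i => PySem.Str.lower (PySem.Str.strip i))

-- first = {}; for i, x in enumerate(candidates): if x not in first: first[x] = i
def pvFirstIdx (cands : List String) : PySem.Dict String Int :=
  (PySem.List.enumerate cands).foldl
    (fun d p => if d.contains p.2 then d else d.insert p.2 p.1) (PySem.Dict.mk [])

def enrich_tags_alt (tags : Option (List String)) (editor_labels : Option (List String)) : List String :=
  let candidates := pvNorm tags ++ (pvNorm editor_labels).filterMap (fun l => pvEditorLabels.get? l)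
  let first := pvFirstIdx candidates
  -- first[x] never misses (every candidate is a key), so getD's default is inert
  ((PySem.List.enumerate candidates).filter (fun p => first.getD p.2 0 == p.1)).map (fun p => p.2)

-- ===== PRECONDITION & SPEC =====
def Spec_enrich_tags (tags : Option (List String)) (editor_labels : Option (List String)) (out : List String) : Prop := out = enrich_tags_alt tags editor_labels
instance (tags : Option (List String)) (editor_labels : Option (List String)) (out : List String) : Decidable (Spec_enrich_tags tags editor_labels out) := by unfold Spec_enrich_tags; infer_instance

-- ===== CLAIM (what is proved, stated in full; the proofs are below) =====
def Claim_equal_enrich_tags : Prop := ∀ (tags : Option (List String)) (editor_labels : Option (List String)), Dom_enrich_tags tags editor_labels → Spec_enrich_tags tags editor_labels (enrich_tags tags editor_labels)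

-- ===== LEMMAS AND PROOFS =====

-- every value of the editor-label dict is a nonempty string
theorem pvEditorLabels_val_ne (l m : String) (h : pvEditorLabels.get? l = some m) : m ≠ "" := by
  intro hm
  subst hm
  simp [pvEditorLabels, PySem.Dict.get?] at h

-- A's dedup-append step on a duplicated state equals Set.add on both components
theorem pvStep1_eq (s : PySem.Set String) (y : String) :
    (if y ∈ s then ((s, s) : PySem.Set String × List String) else (PySem.Set.add s y, s ++ [y]))
      = (PySem.Set.add s y, PySem.Set.add s y) := by
  by_cases h : y ∈ s
  · simp [h]
  · simp [h]

theorem pvLoop1_eq (ys : List String) : ∀ s : PySem.Set String,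
    ys.foldl (fun st t => if t ∈ st.1 then st else (PySem.Set.add st.1 t, st.2 ++ [t])) (s, s)
      = (ys.foldl PySem.Set.add s, ys.foldl PySem.Set.add s) := by
  induction ys with
  | nil => intro s; rfl
  | cons y ys ih =>
      intro s
      simp only [List.foldl_cons]
      rw [show (if y ∈ (s, s).1 then ((s, s) : PySem.Set String × List String)
            else (PySem.Set.add (s, s).1 y, (s, s).2 ++ [y]))
          = (PySem.Set.add s y, PySem.Set.add s y) from pvStep1_eq s y]
      exact ih (PySem.Set.add s y)

theorem pvLoop2_eq (ls : List String) : ∀ s : PySem.Set String,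
    ls.foldl (fun st label =>
        match pvEditorLabels.get? label with
        | none => st
        | some mapped =>
            if mapped ≠ "" ∧ mapped ∉ st.1 then (PySem.Set.add st.1 mapped, st.2 ++ [mapped]) else st)
      (s, s)
      = ((ls.filterMap (fun l => pvEditorLabels.get? l)).foldl PySem.Set.add s,
         (ls.filterMap (fun l => pvEditorLabels.get? l)).foldl PySem.Set.add s) := by
  induction ls with
  | nil => intro s; rfl
  | cons l ls ih =>
      intro s
      simp only [List.foldl_cons, List.filterMap_cons]
      cases hgt : pvEditorLabels.get? l with
      | none => simpa [hgt] using ih s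
      | some m =>
          have hne : m ≠ "" := pvEditorLabels_val_ne l m hgt
          simp only [List.foldl_cons]
          by_cases hm : m ∈ s
          · have : (if m ≠ "" ∧ m ∉ (s, s).1 then
                (PySem.Set.add (s, s).1 m, (s, s).2 ++ [m]) else ((s, s) : PySem.Set String × List String))
                = (PySem.Set.add s m, PySem.Set.add s m) := by
              simp [hm]
            rw [this]; exact ih _
          · have : (if m ≠ "" ∧ m ∉ (s, s).1 then
                (PySem.Set.add (s, s).1 m, (s, s).2 ++ [m]) else ((s, s) : PySem.Set String × List String))
                = (PySem.Set.add s m, PySem.Set.add s m) := by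
              simp [hm, hne]
            rw [this]; exact ih _

-- pvFirstIdx seen from the right: appending x inserts it only if unseen
theorem pvFirstIdx_append (cands : List String) (x : String) :
    pvFirstIdx (cands ++ [x])
      = (if (pvFirstIdx cands).contains x then pvFirstIdx cands
         else (pvFirstIdx cands).insert x (cands.length : Int)) := by
  unfold pvFirstIdx
  rw [PySem.List.enumerate_append, List.foldl_append]
  simp [PySem.List.enumerate]

-- the map's keys are exactly the candidates
theorem pvContains_firstIdx (cands : List String) : ∀ (y : String),
    (pvFirstIdx cands).contains y = decide (y ∈ cands) := by
  induction cands using List.reverseRecOn with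
  | nil => intro y; simp [pvFirstIdx, PySem.List.enumerate]
  | append_singleton cs x ih =>
      intro y
      rw [pvFirstIdx_append]
      by_cases hx : x ∈ cs
      · rw [if_pos (by rw [ih x]; simpa using hx)]
        rw [ih y]
        by_cases hyx : y = x <;> simp [hyx, hx]
      · rw [if_neg (by rw [ih x]; simpa using hx)]
        rw [PySem.Dict.contains_insert, ih y]
        by_cases hyx : y = x <;> simp [hyx]

-- every stored first-occurrence index is a valid position
theorem pvGetD_firstIdx_lt (cands : List String) (y : String) (hy : y ∈ cands) :
    0 ≤ (pvFirstIdx cands).getD y 0 ∧ (pvFirstIdx cands).getD y 0 < (cands.length : Int) := by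
  induction cands using List.reverseRecOn with
  | nil => simp at hy
  | append_singleton cs x ih =>
      rw [pvFirstIdx_append]
      by_cases hx : x ∈ cs
      · rw [if_pos (by rw [pvContains_firstIdx _ x]; simpa using hx)]
        have hy' : y ∈ cs := by
          rcases List.mem_append.mp hy with h | h
          · exact h
          · simpa using (by simpa using h) ▸ hx
        have := ih hy'
        constructor
        · exact this.1
        · calc (pvFirstIdx cs).getD y 0 < (cs.length : Int) := this.2
            _ ≤ ((cs ++ [x]).length : Int) := by simp
      · rw [if_neg (by rw [pvContains_firstIdx _ x]; simpa using hx)]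
        by_cases hyx : y = x
        · subst hyx
          rw [PySem.Dict.getD_insert_self]
          constructor
          · positivity
          · simp
        · rw [PySem.Dict.getD_insert, if_neg hyx]
          have hy' : y ∈ cs := by
            rcases List.mem_append.mp hy with h | h
            · exact h
            · exact absurd (by simpa using h) hyx
          have := ih hy'
          refine ⟨this.1, ?_⟩
          calc (pvFirstIdx cs).getD y 0 < (cs.length : Int) := this.2
            _ ≤ ((cs ++ [x]).length : Int) := by simp

-- B's keep-first-occurrence filter computes the ordered dedup (set-as-list) of cands
theorem pvB_eq_ofList (cands : List String) :
    ((PySem.List.enumerate cands).filter (fun p => (pvFirstIdx cands).getD p.2 0 == p.1)).map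
        (fun p => p.2)
      = PySem.Set.ofList cands := by
  induction cands using List.reverseRecOn with
  | nil => simp [PySem.List.enumerate, PySem.Set.ofList]
  | append_singleton cs x ih =>
      rw [PySem.List.enumerate_append, pvFirstIdx_append, List.filter_append, List.map_append,
        PySem.Set.ofList_append_singleton]
      have hmem : ∀ p ∈ PySem.List.enumerate cs, p.2 ∈ cs := by
        intro p hp
        rcases (PySem.List.mem_enumerate_iff _ _ _).mp hp with ⟨k, hk, rfl⟩
        exact List.getElem_mem hk
      by_cases hx : x ∈ cs
      · rw [if_pos (by rw [pvContains_firstIdx _ x]; simpa using hx)]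
        have hne : (pvFirstIdx cs).getD x 0 ≠ ((cs.length : Int)) :=
          ne_of_lt (pvGetD_firstIdx_lt cs x hx).2
        rw [PySem.Set.add_of_mem (by rw [PySem.Set.mem_ofList]; exact hx)]
        simp [PySem.List.enumerate, hne, ih]
      · rw [if_neg (by rw [pvContains_firstIdx _ x]; simpa using hx)]
        have hcong : (PySem.List.enumerate cs).filter
              (fun p => ((pvFirstIdx cs).insert x (cs.length : Int)).getD p.2 0 == p.1)
            = (PySem.List.enumerate cs).filter (fun p => (pvFirstIdx cs).getD p.2 0 == p.1) := by
          apply List.filter_congr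
          intro p hp
          have : p.2 ≠ x := fun h => hx (h ▸ hmem p hp)
          rw [PySem.Dict.getD_insert, if_neg this]
        rw [hcong, ih,
          PySem.Set.add_of_not_mem (by rw [PySem.Set.mem_ofList]; exact hx)]
        simp [PySem.List.enumerate, PySem.Dict.getD_insert_self]

-- ===== VERDICT (by name: the statement is the Claim_ definition above) =====
theorem enrich_tags_spec : Claim_equal_enrich_tags := by
  intro tags editor_labels _
  unfold Spec_enrich_tags enrich_tags enrich_tags_alt
  have hbase : pvLowerStripAll (tags.getD []) = pvNorm tags := rfl
  have hlab : pvLowerStripAll (editor_labels.getD []) = pvNorm editor_labels := rfl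
  simp only [hbase, hlab]
  have h0 : ((PySem.Set.empty, ([] : List String)) : PySem.Set String × List String)
      = (PySem.Set.empty, PySem.Set.empty) := rfl
  rw [h0, pvLoop1_eq, pvLoop2_eq]
  rw [← List.foldl_append, pvB_eq_ofList]
  rfl
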